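-- pv_equiv track=rewrite | github.com/plain127/coding_test | 백준/Platinum/4792. 레드 블루 스패닝 트리/레드 블루 스패닝 트리.py | count_blue
-- ===== SOURCE A (Python) =====
-- def find(parent, x):
--     while parent[x] != x:
--         parent[x] = parent[parent[x]]
--         x = parent[x]
--
--     return x
--
-- def union(parent, a, b):
--     ra = find(parent, a)
--     rb = find(parent, b)
--
--     if ra == rb:
--         return False
--
--     parent[rb] = ra
--     return True
--
-- def count_blue(n, edges):
--     parent = list(range(n + 1))
--     blue_count = 0
--     used = 0
--
--     for color, a, b in edges:
--         if union(parent, a, b):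
--             used += 1
--
--             if color == 'B':
--                 blue_count += 1
--
--             if used == n - 1:
--                 break
--
--     return blue_count
-- ===== SOURCE B (Python) =====
-- def count_blue(n, edges):
--     comp = list(range(n + 1))
--     blue_count = 0
--     used = 0
--
--     for color, a, b in edges:
--         ca = comp[a]
--         cb = comp[b]
--
--         if ca != cb:
--             comp = [ca if c == cb else c for c in comp]
--             used += 1
--
--             if color == 'B':
--                 blue_count += 1
--
--             if used == n - 1:
--                 break
--
--     return blue_count
-- ===== Notes on version B (the rewrite author's own statement) =====
-- stated objective: alternative
-- what changed: Replaces the quick-union DSU with path compression (pointer-chasing find + root splicing) by a quick-find representation: one component label per node, union = single scan relabelling every node of the absorbed component; no find loop and no parent mutation remain.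
-- outside the precondition, e.g. on count_blue(2, [('B', 1, 2), ('R', 9, 9)]): A returns 1, B returns 1
import Mathlib
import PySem

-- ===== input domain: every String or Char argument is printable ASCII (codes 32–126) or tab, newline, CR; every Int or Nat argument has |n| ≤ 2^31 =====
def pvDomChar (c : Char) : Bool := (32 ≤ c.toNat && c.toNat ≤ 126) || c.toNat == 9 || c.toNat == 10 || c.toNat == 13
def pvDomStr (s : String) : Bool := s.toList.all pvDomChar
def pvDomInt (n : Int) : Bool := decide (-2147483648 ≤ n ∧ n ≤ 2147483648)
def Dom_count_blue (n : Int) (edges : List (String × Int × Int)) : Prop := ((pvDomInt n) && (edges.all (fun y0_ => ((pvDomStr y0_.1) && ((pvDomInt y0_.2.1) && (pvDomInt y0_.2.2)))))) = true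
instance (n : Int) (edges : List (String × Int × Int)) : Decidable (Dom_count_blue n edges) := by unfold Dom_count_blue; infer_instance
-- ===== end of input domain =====

-- B replaces A's path-compressing quick-union DSU by a quick-find component-label array
-- (union = scan-and-relabel); same greedy loop, same return value (alternative structure, not faster).

-- ===== PORT A =====
-- while parent[x] != x: parent[x] = parent[parent[x]]; x = parent[x]
-- (the while loop is run with fuel = len(parent); the proof shows a forest's chase
--  always reaches its root within that many iterations, so the port is exact on Pre_)
def findA : Nat → List Int → Int → Option (List Int × Int)
  | 0, parent, x => some (parent, x)
  | (f+1), parent, x =>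
    match PySem.List.pyGet? parent x with
    | none => none
    | some px =>
      if px = x then some (parent, x)
      else
        match PySem.List.pyGet? parent px with
        | none => none
        | some ppx =>
          match PySem.List.pySet? parent x ppx with
          | none => none
          | some parent1 => findA f parent1 ppx

def unionA (parent : List Int) (a b : Int) : Option (List Int × Bool) :=
  match findA parent.length parent a with
  | none => none
  | some (parent1, ra) =>
    match findA parent1.length parent1 b with
    | none => none
    | some (parent2, rb) =>
      if ra = rb then some (parent2, false)
      else
        match PySem.List.pySet? parent2 rb ra with
        | none => none
        | some parent3 => some (parent3, true)

def loopA (n : Int) : List (String × Int × Int) → List Int → Int → Int → Option Int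
  | [], _, blue, _ => some blue
  | (c, a, b) :: rest, parent, blue, used =>
    match unionA parent a b with
    | none => none
    | some (parent1, ok) =>
      if ok then
        if used + 1 = n - 1 then some (if c = "B" then blue + 1 else blue)
        else loopA n rest parent1 (if c = "B" then blue + 1 else blue) (used + 1)
      else loopA n rest parent1 blue used

def count_blue (n : Int) (edges : List (String × Int × Int)) : Int :=
  (loopA n edges (PySem.List.pyRange 0 (n + 1) 1) 0 0).getD 0

-- ===== PORT B =====
def loopB (n : Int) : List (String × Int × Int) → List Int → Int → Int → Option Int
  | [], _, blue, _ => some blue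
  | (c, a, b) :: rest, comp, blue, used =>
    match PySem.List.pyGet? comp a, PySem.List.pyGet? comp b with
    | some ca, some cb =>
      if ca ≠ cb then
        if used + 1 = n - 1 then some (if c = "B" then blue + 1 else blue)
        else loopB n rest (comp.map fun v => if v = cb then ca else v) (if c = "B" then blue + 1 else blue) (used + 1)
      else loopB n rest comp blue used
    | _, _ => none

def count_blue_alt (n : Int) (edges : List (String × Int × Int)) : Int :=
  (loopB n edges (PySem.List.pyRange 0 (n + 1) 1) 0 0).getD 0

-- ===== PRECONDITION & SPEC =====
-- Pre_ excludes inputs on which Python indexes the parent array out of range, i.e. some edge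
-- endpoint outside [-(n+1), n]; on almost all of them A raises IndexError, except when an
-- out-of-range endpoint sits after the early break (used == n-1), where A returns the same
-- value B does (see claim.json "cites").
def Pre_count_blue (n : Int) (edges : List (String × Int × Int)) : Prop :=
  ∀ e ∈ edges, 0 ≤ n ∧ -(n+1) ≤ e.2.1 ∧ e.2.1 ≤ n ∧ -(n+1) ≤ e.2.2 ∧ e.2.2 ≤ n
instance (n : Int) (edges : List (String × Int × Int)) : Decidable (Pre_count_blue n edges) := by
  unfold Pre_count_blue; infer_instance
def pvWitness_count_blue : Int × (List (String × Int × Int)) := (2, [("B", 0, 1), ("R", 1, 2)])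
def Spec_count_blue (n : Int) (edges : List (String × Int × Int)) (out : Int) : Prop := out = count_blue_alt n edges
instance (n : Int) (edges : List (String × Int × Int)) (out : Int) : Decidable (Spec_count_blue n edges out) := by unfold Spec_count_blue; infer_instance

-- ===== CLAIM (what is proved, stated in full; the proofs are below) =====
def Claim_equal_count_blue : Prop := ∀ (n : Int) (edges : List (String × Int × Int)), Dom_count_blue n edges → Pre_count_blue n edges → Spec_count_blue n edges (count_blue n edges)

-- ===== LEMMAS AND PROOFS =====

-- one parent-chasing step, as a position
def pstep (p : List Int) (i : Nat) : Nat := (p.getD i 0).toNat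

-- RootedN p k i r: from node i, k parent steps reach the root r
inductive RootedN (p : List Int) : Nat → Nat → Nat → Prop
  | root (i : Nat) (h : p.getD i 0 = (i : Int)) : RootedN p 0 i i
  | step (k i r : Nat) (h : p.getD i 0 ≠ (i : Int)) (ht : RootedN p k (pstep p i) r) : RootedN p (k+1) i r

def Valid (p : List Int) : Prop := ∀ v ∈ p, 0 ≤ v ∧ v < (p.length : Int)

def rootsN (p : List Int) : Nat := ((Finset.range p.length).filter (fun i => p.getD i 0 = (i : Int))).card

def Good (p : List Int) : Prop :=
  Valid p ∧ ∀ i, i < p.length → ∃ r k, RootedN p k i r ∧ k + rootsN p ≤ p.length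

-- what a find call preserves
def Samey (p p' : List Int) : Prop :=
  p'.length = p.length ∧ Valid p' ∧
  (∀ j, j < p.length → ((p'.getD j 0 = (j : Int)) ↔ (p.getD j 0 = (j : Int)))) ∧
  (∀ j s m, j < p.length → RootedN p m j s → ∃ m' ≤ m, RootedN p' m' j s)

-- normalized python index (matches PySem.List.pyIdx? on in-range input)
def nidx (L : Nat) (x : Int) : Nat := if 0 ≤ x then x.toNat else L - (-x).toNat

def CompInv (p comp : List Int) : Prop :=
  comp.length = p.length ∧ ∀ i, i < p.length → ∀ r k, RootedN p k i r → comp.getD i 0 = (r : Int)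

lemma pyIdx?_eq (L : Nat) (x : Int) (h : PySem.Raise.InRange L x) :
    PySem.List.pyIdx? L x = some (nidx L x) := by
  rcases h with ⟨h1, h2⟩
  simp only [PySem.List.pyIdx?, nidx]
  split_ifs with h3 <;> simp_all <;> omega

lemma nidx_lt (L : Nat) (x : Int) (h : PySem.Raise.InRange L x) : nidx L x < L := by
  rcases h with ⟨h1, h2⟩; unfold nidx; split_ifs <;> omega

lemma nidx_natCast (L : Nat) (i : Nat) : nidx L (i : Int) = i := by simp [nidx]

lemma getD_eq_getElem' (p : List Int) (j : Nat) (h : j < p.length) : p.getD j 0 = p[j] :=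
  List.getD_eq_getElem p 0 h

lemma pyGet?_eq_getD (p : List Int) (x : Int) (h : PySem.Raise.InRange p.length x) :
    PySem.List.pyGet? p x = some (p.getD (nidx p.length x) 0) := by
  simp [PySem.List.pyGet?, pyIdx?_eq _ _ h, List.getElem?_eq_getElem (nidx_lt _ _ h),
    getD_eq_getElem' p _ (nidx_lt _ _ h)]

lemma pySet?_eq_set (p : List Int) (x : Int) (v : Int) (h : PySem.Raise.InRange p.length x) :
    PySem.List.pySet? p x v = some (p.set (nidx p.length x) v) := by
  simp [PySem.List.pySet?, pyIdx?_eq _ _ h]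

lemma valid_getD (p : List Int) (hV : Valid p) (j : Nat) (hj : j < p.length) :
    0 ≤ p.getD j 0 ∧ p.getD j 0 < (p.length : Int) := by
  rw [getD_eq_getElem' p j hj]; exact hV _ (p.getElem_mem hj)

lemma pstep_lt (p : List Int) (hV : Valid p) (j : Nat) (hj : j < p.length) :
    pstep p j < p.length := by
  have := valid_getD p hV j hj; unfold pstep; omega

lemma getD_cast (p : List Int) (hV : Valid p) (j : Nat) (hj : j < p.length) :
    p.getD j 0 = ((pstep p j : Nat) : Int) := by
  have := valid_getD p hV j hj; unfold pstep; omega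

lemma getD_set (p : List Int) (i j : Nat) (v : Int) (hi : i < p.length) (hj : j < p.length) :
    (p.set i v).getD j 0 = if j = i then v else p.getD j 0 := by
  rw [getD_eq_getElem' _ j (by simpa using hj)]
  rw [List.getElem_set]
  split_ifs with h1 h2 h3 <;> first
    | rfl
    | (exact absurd h1.symm h2) | (exact absurd h3.symm h1)
    | (exact (getD_eq_getElem' p j hj).symm)

lemma getD_map_if (comp : List Int) (f : Int → Int) (j : Nat) (hj : j < comp.length) :
    (comp.map f).getD j 0 = f (comp.getD j 0) := by
  rw [getD_eq_getElem' _ j (by simpa using hj), getD_eq_getElem' comp j hj]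
  simp

lemma rootedN_unique (p : List Int) : ∀ {k i r m s}, RootedN p k i r → RootedN p m i s →
    k = m ∧ r = s := by
  intro k i r m s h1
  induction h1 generalizing m s with
  | root i h => intro h2; cases h2 with
    | root => exact ⟨rfl, rfl⟩
    | step => simp_all
  | step k i r h ht ih => intro h2; cases h2 with
    | root => simp_all
    | step m' _ s h' ht' =>
      have := ih ht'; exact ⟨by omega, this.2⟩

lemma rootedN_of_root (p : List Int) {i r k : Nat} (h : p.getD i 0 = (i : Int))
    (hr : RootedN p k i r) : k = 0 ∧ r = i := by
  cases hr with
  | root => exact ⟨rfl, rfl⟩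
  | step => simp_all

lemma rootedN_of_step (p : List Int) {i r k : Nat} (h : p.getD i 0 ≠ (i : Int))
    (hr : RootedN p k i r) : ∃ k', k = k' + 1 ∧ RootedN p k' (pstep p i) r := by
  cases hr with
  | root _ h' => exact absurd h' h
  | step k' _ _ _ ht => exact ⟨k', rfl, ht⟩

lemma rootedN_prop (p : List Int) (hV : Valid p) : ∀ {k i r}, i < p.length →
    RootedN p k i r → r < p.length ∧ p.getD r 0 = (r : Int) := by
  intro k i r hi hr
  induction hr with
  | root i h => exact ⟨hi, h⟩
  | step k i r h ht ih => exact ih (pstep_lt p hV i hi)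

lemma two_cycle_absurd (p : List Int) (hV : Valid p) {i s m : Nat} (hi : i < p.length)
    (hr : RootedN p m i s) (hnr : p.getD i 0 ≠ (i : Int))
    (hcyc : pstep p (pstep p i) = i) : False := by
  obtain ⟨k1, hk1, ht1⟩ := rootedN_of_step p hnr hr
  by_cases hroot : p.getD (pstep p i) 0 = ((pstep p i : Nat) : Int)
  · have he : pstep p (pstep p i) = pstep p i := by
      unfold pstep at hroot ⊢; rw [hroot]; omega
    have hii : pstep p i = i := by omega
    rw [hii] at hroot
    exact hnr hroot
  · obtain ⟨k2, hk2, ht2⟩ := rootedN_of_step p hroot ht1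
    rw [hcyc] at ht2
    have := (rootedN_unique p hr ht2).1
    omega

lemma compress_preserve : ∀ (m : Nat) (p : List Int) (ix : Nat), Good p → ix < p.length →
    ∀ j s, j < p.length → RootedN p m j s →
    ∃ m' ≤ m, RootedN (p.set ix (p.getD (pstep p ix) 0)) m' j s := by
  intro m
  induction m using Nat.strong_induction_on with
  | _ m IH =>
    intro p ix hG hix j s hj hr
    have hV := hG.1
    have hj1lt : pstep p ix < p.length := pstep_lt p hV ix hix
    cases hr with
    | root _ h =>
      by_cases hji : j = ix
      · subst hji
        have hpix : pstep p j = j := by unfold pstep; rw [h]; simp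
        refine ⟨0, le_refl 0, RootedN.root _ ?_⟩
        rw [getD_set p j j _ hix hix, if_pos rfl, hpix]
        exact h
      · refine ⟨0, le_refl 0, RootedN.root _ ?_⟩
        rw [getD_set p ix j _ hix hj, if_neg hji]
        exact h
    | step k _ _ h ht =>
      by_cases hji : j = ix
      · rw [hji] at h ht ⊢
        by_cases hroot : p.getD (pstep p ix) 0 = ((pstep p ix : Nat) : Int)
        · obtain ⟨hk0, hs⟩ := rootedN_of_root p hroot ht
          subst hs
          have hne : pstep p ix ≠ ix := by
            intro e; rw [e] at hroot; exact h hroot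
          refine ⟨1, by omega, ?_⟩
          refine RootedN.step 0 ix (pstep p ix) ?_ ?_
          · rw [getD_set p ix ix _ hix hix, if_pos rfl, hroot]
            exact fun e => hne (by exact_mod_cast e)
          · have hps : pstep (p.set ix (p.getD (pstep p ix) 0)) ix = pstep p ix := by
              have hr' := hroot
              unfold pstep at hr' ⊢
              rw [getD_set p ix ix _ hix hix, if_pos rfl, hr']
              omega
            rw [hps]
            refine RootedN.root _ ?_
            rw [getD_set p ix (pstep p ix) _ hix hj1lt, if_neg hne]
            exact hroot
        · obtain ⟨k2, hk2, ht2⟩ := rootedN_of_step p hroot ht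
          have hj2lt : pstep p (pstep p ix) < p.length := pstep_lt p hV _ hj1lt
          have hj2ne : pstep p (pstep p ix) ≠ ix := by
            intro e
            exact two_cycle_absurd p hV hix (RootedN.step k ix s h ht) h e
          obtain ⟨m'', hm'', hr''⟩ := IH k2 (by omega) p ix hG hix (pstep p (pstep p ix)) s hj2lt ht2
          refine ⟨m'' + 1, by omega, ?_⟩
          refine RootedN.step m'' ix s ?_ ?_
          · rw [getD_set p ix ix _ hix hix, if_pos rfl, getD_cast p hV _ hj1lt]
            exact fun e => hj2ne (by exact_mod_cast e)
          · have hps : pstep (p.set ix (p.getD (pstep p ix) 0)) ix = pstep p (pstep p ix) := by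
              unfold pstep
              rw [getD_set p ix ix _ hix hix, if_pos rfl]
            rw [hps]
            exact hr''
      · obtain ⟨m'', hm'', hr''⟩ := IH k (by omega) p ix hG hix (pstep p j) s (pstep_lt p hV j hj) ht
        refine ⟨m'' + 1, by omega, ?_⟩
        refine RootedN.step m'' j s ?_ ?_
        · rw [getD_set p ix j _ hix hj, if_neg hji]
          exact h
        · have hps : pstep (p.set ix (p.getD (pstep p ix) 0)) j = pstep p j := by
            unfold pstep
            rw [getD_set p ix j _ hix hj, if_neg hji]
          rw [hps]
          exact hr''

lemma compress_rootiff (p : List Int) (ix : Nat) (hG : Good p) (hix : ix < p.length) :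
    ∀ j, j < p.length →
      ((p.set ix (p.getD (pstep p ix) 0)).getD j 0 = (j : Int) ↔ p.getD j 0 = (j : Int)) := by
  intro j hj
  have hV := hG.1
  by_cases hji : j = ix
  · subst hji
    rw [getD_set p j j _ hix hix, if_pos rfl]
    constructor
    · intro hset
      by_contra hnr
      obtain ⟨r, k, hr, _⟩ := hG.2 j hix
      apply two_cycle_absurd p hV hix hr hnr
      unfold pstep at hset ⊢
      rw [hset]
      simp
    · intro hroot
      have hpix : pstep p j = j := by unfold pstep; rw [hroot]; simp
      rw [hpix, hroot]
  · rw [getD_set p ix j _ hix hj]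
    simp [hji]

lemma compress_samey (p : List Int) (ix : Nat) (hG : Good p) (hix : ix < p.length) :
    Samey p (p.set ix (p.getD (pstep p ix) 0)) := by
  have hV := hG.1
  have hj1lt : pstep p ix < p.length := pstep_lt p hV ix hix
  refine ⟨by simp, ?_, compress_rootiff p ix hG hix, ?_⟩
  · intro v hv
    simp only [List.length_set]
    rcases List.mem_or_eq_of_mem_set hv with h | h
    · exact hV v h
    · subst h
      exact valid_getD p hV _ hj1lt
  · intro j s m hj hr
    exact compress_preserve m p ix hG hix j s hj hr

lemma samey_refl (p : List Int) (hV : Valid p) : Samey p p :=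
  ⟨rfl, hV, fun _ _ => Iff.rfl, fun j s m _ hr => ⟨m, le_refl m, hr⟩⟩

lemma samey_trans {p q r : List Int} (h1 : Samey p q) (h2 : Samey q r) : Samey p r := by
  obtain ⟨hl1, hv1, hi1, hp1⟩ := h1
  obtain ⟨hl2, hv2, hi2, hp2⟩ := h2
  refine ⟨hl2.trans hl1, hv2, fun j hj => ?_, fun j s m hj hr => ?_⟩
  · exact (hi2 j (hl1 ▸ hj)).trans (hi1 j hj)
  · obtain ⟨m1, hm1, hr1⟩ := hp1 j s m hj hr
    obtain ⟨m2, hm2, hr2⟩ := hp2 j s m1 (hl1 ▸ hj) hr1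
    exact ⟨m2, le_trans hm2 hm1, hr2⟩

lemma samey_rootsN {p p' : List Int} (h : Samey p p') : rootsN p' = rootsN p := by
  obtain ⟨hl, _, hiff, _⟩ := h
  unfold rootsN
  rw [hl]
  congr 1
  apply Finset.filter_congr
  intro j hj
  simp only [Finset.mem_range] at hj
  exact hiff j hj

lemma samey_good {p p' : List Int} (hG : Good p) (h : Samey p p') : Good p' := by
  obtain ⟨hl, hv, hiff, hpres⟩ := h
  refine ⟨hv, fun i hi => ?_⟩
  obtain ⟨r, k, hr, hb⟩ := hG.2 i (hl ▸ hi)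
  obtain ⟨m', hm', hr'⟩ := hpres i r k (hl ▸ hi) hr
  exact ⟨r, m', hr', by rw [samey_rootsN ⟨hl, hv, hiff, hpres⟩, hl]; omega⟩

lemma rootsN_le (p : List Int) : rootsN p ≤ p.length := by
  unfold rootsN
  exact le_trans (Finset.card_filter_le _ _) (by simp)

lemma findA_spec : ∀ (fuel : Nat) (p : List Int) (x : Int) (k r : Nat),
    Good p → PySem.Raise.InRange p.length x →
    RootedN p k (nidx p.length x) r →
    (0 ≤ x → k ≤ fuel) → (x < 0 → 1 ≤ fuel ∧ k ≤ fuel + 1) →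
    ∃ p', findA fuel p x = some (p', (r : Int)) ∧ Samey p p' := by
  intro fuel
  induction fuel with
  | zero =>
    intro p x k r hG hIR hroot hpos hneg
    have hx : 0 ≤ x := by
      by_contra hcon
      exact absurd (hneg (by omega)).1 (by omega)
    have hk : k = 0 := by have := hpos hx; omega
    subst hk
    cases hroot with
    | root _ h =>
      refine ⟨p, ?_, samey_refl p hG.1⟩
      have : ((nidx p.length x : Nat) : Int) = x := by
        unfold nidx; rw [if_pos hx]; omega
      rw [findA, this]
  | succ f IH =>
    intro p x k r hG hIR hroot hpos hneg
    have hV := hG.1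
    have hixlt : nidx p.length x < p.length := nidx_lt p.length x hIR
    have hj1lt : pstep p (nidx p.length x) < p.length := pstep_lt p hV _ hixlt
    have hgetx := pyGet?_eq_getD p x hIR
    rw [findA, hgetx]
    dsimp only
    by_cases hpx : p.getD (nidx p.length x) 0 = x
    · rw [if_pos hpx]
      have hx : 0 ≤ x := (valid_getD p hV _ hixlt).1.trans_eq hpx
      have hixx : ((nidx p.length x : Nat) : Int) = x := by
        unfold nidx; rw [if_pos hx]; omega
      have hrootix : p.getD (nidx p.length x) 0 = ((nidx p.length x : Nat) : Int) := by
        rw [hpx, hixx]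
      obtain ⟨hk0, hrr⟩ := rootedN_of_root p hrootix hroot
      refine ⟨p, ?_, samey_refl p hV⟩
      rw [hrr, hixx]
    · rw [if_neg hpx]
      have hpxj1 : p.getD (nidx p.length x) 0 = ((pstep p (nidx p.length x) : Nat) : Int) :=
        getD_cast p hV _ hixlt
      have hIR1 : PySem.Raise.InRange p.length ((pstep p (nidx p.length x) : Nat) : Int) :=
        ⟨by omega, by omega⟩
      rw [hpxj1, pyGet?_eq_getD p _ hIR1, nidx_natCast]
      dsimp only
      rw [pySet?_eq_set p x _ hIR]
      dsimp only
      -- the compressed array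
      have hsame1 : Samey p (p.set (nidx p.length x) (p.getD (pstep p (nidx p.length x)) 0)) :=
        compress_samey p (nidx p.length x) hG hixlt
      have hG1 : Good (p.set (nidx p.length x) (p.getD (pstep p (nidx p.length x)) 0)) :=
        samey_good hG hsame1
      have hlen1 : (p.set (nidx p.length x) (p.getD (pstep p (nidx p.length x)) 0)).length
          = p.length := by simp
      have hj2lt : pstep p (pstep p (nidx p.length x)) < p.length := pstep_lt p hV _ hj1lt
      have hppx : p.getD (pstep p (nidx p.length x)) 0
          = ((pstep p (pstep p (nidx p.length x)) : Nat) : Int) := getD_cast p hV _ hj1lt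
      -- find the derivation to feed the recursive call
      by_cases hrootix : p.getD (nidx p.length x) 0 = ((nidx p.length x : Nat) : Int)
      · -- the start node is already a root (only reachable with negative x)
        obtain ⟨hk0, hrr⟩ := rootedN_of_root p hrootix hroot
        have hj1ix : pstep p (nidx p.length x) = nidx p.length x := by
          unfold pstep; rw [hrootix]; simp
        have hrootix' : (p.set (nidx p.length x) (p.getD (pstep p (nidx p.length x)) 0)).getD
            (nidx p.length x) 0 = ((nidx p.length x : Nat) : Int) :=
          (compress_rootiff p _ hG hixlt _ hixlt).mpr hrootix
        obtain ⟨p'', heq, hsame2⟩ := IH _ ((pstep p (pstep p (nidx p.length x)) : Nat) : Int) 0 r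
          hG1 (by rw [hlen1]; exact ⟨by omega, by omega⟩)
          (by rw [nidx_natCast, hj1ix, hj1ix, hrr]
              rw [hj1ix] at hrootix'
              exact RootedN.root _ hrootix')
          (fun _ => Nat.zero_le f) (by omega)
        rw [← hppx] at heq
        exact ⟨p'', heq, samey_trans hsame1 hsame2⟩
      · obtain ⟨k1, hk1, ht1⟩ := rootedN_of_step p hrootix hroot
        by_cases hrootj1 : p.getD (pstep p (nidx p.length x)) 0
            = ((pstep p (nidx p.length x) : Nat) : Int)
        · obtain ⟨hk10, hrr⟩ := rootedN_of_root p hrootj1 ht1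
          have hj2j1 : pstep p (pstep p (nidx p.length x)) = pstep p (nidx p.length x) := by
            unfold pstep at hrootj1 ⊢; rw [hrootj1]; omega
          have hrootj1' : (p.set (nidx p.length x) (p.getD (pstep p (nidx p.length x)) 0)).getD
              (pstep p (nidx p.length x)) 0 = ((pstep p (nidx p.length x) : Nat) : Int) :=
            (compress_rootiff p _ hG hixlt _ hj1lt).mpr hrootj1
          obtain ⟨p'', heq, hsame2⟩ := IH _ ((pstep p (pstep p (nidx p.length x)) : Nat) : Int) 0 r
            hG1 (by rw [hlen1]; exact ⟨by omega, by omega⟩)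
            (by rw [nidx_natCast, hj2j1, hrr]
                exact RootedN.root _ hrootj1')
            (fun _ => Nat.zero_le f) (by omega)
          rw [← hppx] at heq
          exact ⟨p'', heq, samey_trans hsame1 hsame2⟩
        · obtain ⟨k2, hk2, ht2⟩ := rootedN_of_step p hrootj1 ht1
          obtain ⟨m', hm', ht2'⟩ :=
            compress_preserve k2 p (nidx p.length x) hG hixlt _ r hj2lt ht2
          have hm'f : m' ≤ f := by
            by_cases hx : 0 ≤ x
            · have := hpos hx; omega
            · have := (hneg (by omega)).2; omega
          obtain ⟨p'', heq, hsame2⟩ := IH _ ((pstep p (pstep p (nidx p.length x)) : Nat) : Int) m' r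
            hG1 (by rw [hlen1]; exact ⟨by omega, by omega⟩)
            (by rw [nidx_natCast]; exact ht2')
            (fun _ => hm'f) (by omega)
          rw [← hppx] at heq
          exact ⟨p'', heq, samey_trans hsame1 hsame2⟩

lemma link_rooted (p : List Int) (ra rb : Nat) (hV : Valid p) (hra : ra < p.length)
    (hrb : rb < p.length) (hrootA : p.getD ra 0 = (ra : Int))
    (hrootB : p.getD rb 0 = (rb : Int)) (hne : ra ≠ rb) :
    ∀ {m i s}, RootedN p m i s → i < p.length →
      (s = rb → RootedN (p.set rb (ra : Int)) (m+1) i ra) ∧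
      (s ≠ rb → RootedN (p.set rb (ra : Int)) m i s) := by
  intro m i s hr
  induction hr with
  | root i h =>
    intro hi
    constructor
    · intro hs
      subst hs
      refine RootedN.step 0 i ra ?_ ?_
      · rw [getD_set p i i _ hi hi, if_pos rfl]
        exact fun e => hne (by exact_mod_cast e)
      · have hps : pstep (p.set i (ra : Int)) i = ra := by
          unfold pstep
          rw [getD_set p i i _ hi hi, if_pos rfl]
          simp
        rw [hps]
        refine RootedN.root _ ?_
        rw [getD_set p i ra _ hi hra, if_neg hne]
        exact hrootA
    · intro hs
      refine RootedN.root _ ?_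
      rw [getD_set p rb i _ hrb hi, if_neg hs]
      exact h
  | step k i s h ht ih =>
    intro hi
    have hirb : i ≠ rb := by
      intro e; rw [e] at h; exact h hrootB
    have hstep : pstep (p.set rb (ra : Int)) i = pstep p i := by
      unfold pstep
      rw [getD_set p rb i _ hrb hi, if_neg hirb]
    have hentry : (p.set rb (ra : Int)).getD i 0 ≠ (i : Int) := by
      rw [getD_set p rb i _ hrb hi, if_neg hirb]
      exact h
    have ih' := ih (pstep_lt p hV i hi)
    constructor
    · intro hs
      refine RootedN.step (k+1) i ra hentry ?_
      rw [hstep]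
      exact ih'.1 hs
    · intro hs
      refine RootedN.step k i s hentry ?_
      rw [hstep]
      exact ih'.2 hs

lemma link_good (p : List Int) (ra rb : Nat) (hG : Good p) (hra : ra < p.length)
    (hrb : rb < p.length) (hrootA : p.getD ra 0 = (ra : Int))
    (hrootB : p.getD rb 0 = (rb : Int)) (hne : ra ≠ rb) :
    Good (p.set rb (ra : Int)) := by
  have hV := hG.1
  have hmem : rb ∈ (Finset.range p.length).filter (fun i => p.getD i 0 = (i : Int)) :=
    Finset.mem_filter.2 ⟨Finset.mem_range.2 hrb, hrootB⟩
  have hRpos : 1 ≤ rootsN p := Finset.card_pos.2 ⟨rb, hmem⟩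
  have hroots : rootsN (p.set rb (ra : Int)) = rootsN p - 1 := by
    unfold rootsN
    rw [List.length_set]
    have hfe : (Finset.range p.length).filter
        (fun i => (p.set rb (ra : Int)).getD i 0 = (i : Int)) =
        ((Finset.range p.length).filter (fun i => p.getD i 0 = (i : Int))).erase rb := by
      ext j
      simp only [Finset.mem_filter, Finset.mem_erase, Finset.mem_range]
      constructor
      · rintro ⟨hjr, hpred⟩
        rw [getD_set p rb j _ hrb hjr] at hpred
        by_cases hjrb : j = rb
        · rw [if_pos hjrb] at hpred
          subst hjrb
          exact absurd (show ra = j by exact_mod_cast hpred) hne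
        · rw [if_neg hjrb] at hpred
          exact ⟨hjrb, hjr, hpred⟩
      · rintro ⟨hjrb, hjr, hpred⟩
        refine ⟨hjr, ?_⟩
        rw [getD_set p rb j _ hrb hjr, if_neg hjrb]
        exact hpred
    rw [hfe, Finset.card_erase_of_mem hmem]
  refine ⟨?_, ?_⟩
  · intro v hv
    simp only [List.length_set]
    rcases List.mem_or_eq_of_mem_set hv with hmv | hmv
    · exact hV v hmv
    · subst hmv
      constructor <;> [positivity; exact_mod_cast hra]
  · intro i hi
    simp only [List.length_set] at hi
    obtain ⟨r, k, hr, hb⟩ := hG.2 i hi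
    by_cases hrrb : r = rb
    · refine ⟨ra, k + 1,
        (link_rooted p ra rb hV hra hrb hrootA hrootB hne hr hi).1 hrrb, ?_⟩
      rw [hroots, List.length_set]
      omega
    · refine ⟨r, k,
        (link_rooted p ra rb hV hra hrb hrootA hrootB hne hr hi).2 hrrb, ?_⟩
      rw [hroots, List.length_set]
      omega

lemma compInv_samey {p p' comp : List Int} (hC : CompInv p comp) (hG : Good p)
    (h : Samey p p') : CompInv p' comp := by
  obtain ⟨hl, hv, hiff, hpres⟩ := h
  refine ⟨hC.1.trans hl.symm, fun i hi r k hr => ?_⟩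
  obtain ⟨r0, k0, hr0, _⟩ := hG.2 i (hl ▸ hi)
  obtain ⟨m', _, hr0'⟩ := hpres i r0 k0 (hl ▸ hi) hr0
  have := (rootedN_unique p' hr hr0').2
  rw [this]
  exact hC.2 i (hl ▸ hi) r0 k0 hr0

lemma compInv_link (p comp : List Int) (ra rb : Nat) (hC : CompInv p comp) (hG : Good p)
    (hra : ra < p.length) (hrb : rb < p.length) (hrootA : p.getD ra 0 = (ra : Int))
    (hrootB : p.getD rb 0 = (rb : Int)) (hne : ra ≠ rb) :
    CompInv (p.set rb (ra : Int)) (comp.map fun v => if v = (rb : Int) then (ra : Int) else v) := by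
  have hV := hG.1
  refine ⟨by simp [hC.1], ?_⟩
  intro i hi r k hr
  simp only [List.length_set] at hi
  have hci : i < comp.length := by rw [hC.1]; exact hi
  obtain ⟨r0, k0, hr0, _⟩ := hG.2 i hi
  have hcomp0 : comp.getD i 0 = (r0 : Int) := hC.2 i hi r0 k0 hr0
  rw [getD_map_if comp _ i hci, hcomp0]
  by_cases hr0b : r0 = rb
  · have h1 := (link_rooted p ra rb hV hra hrb hrootA hrootB hne hr0 hi).1 hr0b
    have : r = ra := (rootedN_unique _ hr h1).2
    subst this
    rw [if_pos (by exact_mod_cast congrArg (Nat.cast : Nat → Int) hr0b)]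
  · have h2 := (link_rooted p ra rb hV hra hrb hrootA hrootB hne hr0 hi).2 hr0b
    have : r = r0 := (rootedN_unique _ hr h2).2
    subst this
    rw [if_neg (fun e => hr0b (by exact_mod_cast e))]

lemma loop_eq (n : Int) : ∀ (edges : List (String × Int × Int)) (p comp : List Int)
    (blue used : Int), Good p → CompInv p comp → (p.length : Int) = n + 1 →
    (∀ e ∈ edges, -(n+1) ≤ e.2.1 ∧ e.2.1 ≤ n ∧ -(n+1) ≤ e.2.2 ∧ e.2.2 ≤ n) →
    loopA n edges p blue used = loopB n edges comp blue used := by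
  intro edges
  induction edges with
  | nil => intro p comp blue used _ _ _ _; rfl
  | cons e rest IH =>
    obtain ⟨c, a, b⟩ := e
    intro p comp blue used hG hC hL hbnd
    obtain ⟨hba1, hba2, hbb1, hbb2⟩ := hbnd (c, a, b) List.mem_cons_self
    dsimp only at hba1 hba2 hbb1 hbb2
    have hbnd' : ∀ e ∈ rest, -(n+1) ≤ e.2.1 ∧ e.2.1 ≤ n ∧ -(n+1) ≤ e.2.2 ∧ e.2.2 ≤ n :=
      fun e he => hbnd e (List.mem_cons_of_mem _ he)
    have hIRa : PySem.Raise.InRange p.length a := ⟨by omega, by omega⟩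
    have hIRb : PySem.Raise.InRange p.length b := ⟨by omega, by omega⟩
    have hV := hG.1
    obtain ⟨ra, ka, hra, hbnda⟩ := hG.2 (nidx p.length a) (nidx_lt _ _ hIRa)
    obtain ⟨p1, heq1, hS1⟩ := findA_spec p.length p a ka ra hG hIRa hra
      (fun _ => by omega) (fun _ => ⟨by have := nidx_lt _ _ hIRa; omega, by omega⟩)
    have hlen1 : p1.length = p.length := hS1.1
    have hG1 : Good p1 := samey_good hG hS1
    obtain ⟨rb, kb, hrb, hbndb⟩ := hG.2 (nidx p.length b) (nidx_lt _ _ hIRb)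
    obtain ⟨kb', hkb', hrb1⟩ := hS1.2.2.2 _ rb kb (nidx_lt _ _ hIRb) hrb
    obtain ⟨p2, heq2, hS2⟩ := findA_spec p1.length p1 b kb' rb hG1
      (by rw [hlen1]; exact hIRb) (by rw [hlen1]; exact hrb1)
      (fun _ => by omega) (fun _ => ⟨by have := nidx_lt _ _ hIRb; omega, by omega⟩)
    have hS12 : Samey p p2 := samey_trans hS1 hS2
    have hG2 : Good p2 := samey_good hG hS12
    have hlen2 : p2.length = p.length := by rw [hS2.1, hlen1]
    have hC2 : CompInv p2 comp := compInv_samey hC hG hS12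
    have hIRca : PySem.Raise.InRange comp.length a := by rw [hC.1]; exact hIRa
    have hIRcb : PySem.Raise.InRange comp.length b := by rw [hC.1]; exact hIRb
    have hnidxc : ∀ y : Int, nidx comp.length y = nidx p.length y := by
      intro y; rw [hC.1]
    have hca : PySem.List.pyGet? comp a = some ((ra : Nat) : Int) := by
      rw [pyGet?_eq_getD comp a hIRca, hnidxc]
      exact congrArg some (hC.2 _ (nidx_lt _ _ hIRa) ra ka hra)
    have hcb : PySem.List.pyGet? comp b = some ((rb : Nat) : Int) := by
      rw [pyGet?_eq_getD comp b hIRcb, hnidxc]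
      exact congrArg some (hC.2 _ (nidx_lt _ _ hIRb) rb kb hrb)
    by_cases hrab : ra = rb
    · have hun : unionA p a b = some (p2, false) := by
        rw [unionA, heq1]
        dsimp only
        rw [heq2]
        dsimp only
        rw [if_pos (by exact_mod_cast congrArg (Nat.cast : Nat → Int) hrab)]
      rw [loopA, loopB, hun, hca, hcb]
      dsimp only
      rw [if_neg (show ¬ ((ra : Nat) : Int) ≠ ((rb : Nat) : Int) by simp [hrab])]
      exact IH p2 comp blue used hG2 hC2 (by rw [hlen2]; exact hL) hbnd'
    · have hralt : ra < p.length := (rootedN_prop p hV (nidx_lt _ _ hIRa) hra).1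
      have hrblt : rb < p.length := (rootedN_prop p hV (nidx_lt _ _ hIRb) hrb).1
      have hroota2 : p2.getD ra 0 = ((ra : Nat) : Int) :=
        (hS12.2.2.1 ra hralt).mpr (rootedN_prop p hV (nidx_lt _ _ hIRa) hra).2
      have hrootb2 : p2.getD rb 0 = ((rb : Nat) : Int) :=
        (hS12.2.2.1 rb hrblt).mpr (rootedN_prop p hV (nidx_lt _ _ hIRb) hrb).2
      have hIRrb : PySem.Raise.InRange p2.length ((rb : Nat) : Int) := by
        rw [hlen2]; exact ⟨by omega, by omega⟩
      have hset : PySem.List.pySet? p2 ((rb : Nat) : Int) ((ra : Nat) : Int)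
          = some (p2.set rb ((ra : Nat) : Int)) := by
        rw [pySet?_eq_set p2 _ _ hIRrb, nidx_natCast]
      have hun : unionA p a b = some (p2.set rb ((ra : Nat) : Int), true) := by
        rw [unionA, heq1]
        dsimp only
        rw [heq2]
        dsimp only
        rw [if_neg (fun e => hrab (by exact_mod_cast e)), hset]
      rw [loopA, loopB, hun, hca, hcb]
      dsimp only
      rw [if_pos (show ((ra : Nat) : Int) ≠ ((rb : Nat) : Int) from
        fun e => hrab (by exact_mod_cast e))]
      rw [if_pos (show true = true from rfl)]
      have hralt2 : ra < p2.length := by rw [hlen2]; exact hralt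
      have hrblt2 : rb < p2.length := by rw [hlen2]; exact hrblt
      have hG3 : Good (p2.set rb ((ra : Nat) : Int)) :=
        link_good p2 ra rb hG2 hralt2 hrblt2 hroota2 hrootb2 hrab
      have hC3 : CompInv (p2.set rb ((ra : Nat) : Int))
          (comp.map fun v => if v = ((rb : Nat) : Int) then ((ra : Nat) : Int) else v) :=
        compInv_link p2 comp ra rb hC2 hG2 hralt2 hrblt2 hroota2 hrootb2 hrab
      by_cases hbk : used + 1 = n - 1
      · rw [if_pos hbk, if_pos hbk]
      · rw [if_neg hbk, if_neg hbk]
        exact IH _ _ _ _ hG3 hC3 (by rw [List.length_set, hlen2]; exact hL) hbnd'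

-- ===== VERDICT (by name: the statement is the Claim_ definition above) =====
lemma init_good (n : Int) (hn : 0 ≤ n) : Good (PySem.List.pyRange 0 (n + 1) 1) := by
  constructor
  · intro v hv
    rw [PySem.List.mem_pyRange_one] at hv
    rw [PySem.List.length_pyRange_one]
    omega
  · intro i hi
    have hroot : (PySem.List.pyRange 0 (n + 1) 1).getD i 0 = (i : Int) := by
      rw [getD_eq_getElem' _ i hi, PySem.List.getElem_pyRange_one]
      simp
    exact ⟨i, 0, RootedN.root i hroot,
      by have := rootsN_le (PySem.List.pyRange 0 (n + 1) 1); omega⟩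

lemma init_compInv (n : Int) :
    CompInv (PySem.List.pyRange 0 (n + 1) 1) (PySem.List.pyRange 0 (n + 1) 1) := by
  refine ⟨rfl, ?_⟩
  intro i hi r k hr
  have hroot : (PySem.List.pyRange 0 (n + 1) 1).getD i 0 = (i : Int) := by
    rw [getD_eq_getElem' _ i hi, PySem.List.getElem_pyRange_one]
    simp
  have := rootedN_of_root _ hroot hr
  rw [this.2]
  exact hroot

theorem count_blue_spec : Claim_equal_count_blue := by
  intro n edges hDom hPre
  unfold Spec_count_blue count_blue count_blue_alt
  cases edges with
  | nil => rfl
  | cons e rest =>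
    have h0 : 0 ≤ n := (hPre e List.mem_cons_self).1
    have hL : ((PySem.List.pyRange 0 (n + 1) 1).length : Int) = n + 1 := by
      rw [PySem.List.length_pyRange_one]
      omega
    rw [loop_eq n (e :: rest) _ _ 0 0 (init_good n h0) (init_compInv n) hL
      (fun x hx => ((hPre x hx).2))]
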